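-- pv_equiv track=rewrite | github.com/cheiru94/python | 2. Personal learning/03. 프로그래머스/LEVEL 1/clear - 폰켓몬.py | solution
-- ===== SOURCE A (Python) =====
-- def solution(nums):
--     answer = 0
--     HALF = len(nums) //2
--     Select_List = [ ]
--     for Index in range(len(nums)) :
--         Element = nums[Index]
--     # 조건식 : if ★ in nums          while len(Select_List) < HALF :
--         if nums[Index] not in Select_List and len(Select_List) < HALF:
--             Select_List.append(Element)
--     answer = len(Select_List)
--     return answer
-- ===== SOURCE B (Python) =====
-- def solution(nums):
--     s = sorted(nums)
--     distinct = 0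
--     prev = None
--     for x in s:
--         if prev is None or x != prev:
--             distinct += 1
--         prev = x
--     return min(distinct, len(nums) // 2)
-- ===== Notes on version B (the rewrite author's own statement) =====
-- stated objective: faster
-- what changed: Replaces A's quadratic loop (a linear membership scan of the selected list inside the index loop) by sort-then-adjacent-compare to count distinct values, capped by len(nums)//2 via min.
import Mathlib
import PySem

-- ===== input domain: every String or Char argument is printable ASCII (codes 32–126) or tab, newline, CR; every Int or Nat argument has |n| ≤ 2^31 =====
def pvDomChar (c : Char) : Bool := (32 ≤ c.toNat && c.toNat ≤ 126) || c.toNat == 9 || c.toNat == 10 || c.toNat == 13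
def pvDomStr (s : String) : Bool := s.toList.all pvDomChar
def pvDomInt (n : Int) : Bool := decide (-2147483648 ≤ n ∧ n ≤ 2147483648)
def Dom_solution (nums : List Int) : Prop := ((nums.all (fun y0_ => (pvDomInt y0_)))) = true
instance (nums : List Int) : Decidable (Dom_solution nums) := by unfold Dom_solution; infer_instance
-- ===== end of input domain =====

-- B replaces A's quadratic loop (membership scan of the selected list inside the index loop)
-- by sort + one adjacent-comparison pass counting distinct values, capped by len(nums)//2.

-- ===== PORT A =====
-- body of A's for-loop: Element = nums[Index]; append if not yet selected and the list is not full
def aStep (HALF : Int) (sel : List Int) (x : Int) : List Int :=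
  if x ∉ sel ∧ (sel.length : Int) < HALF then sel ++ [x] else sel

def solution (nums : List Int) : Int :=
  let HALF := PySem.Int.floordiv (PySem.List.len nums) 2
  let sel := (PySem.List.pyRange 0 (PySem.List.len nums) 1).foldl
    (fun sel i => aStep HALF sel (PySem.List.pyGetD nums i 0)) []
  (sel.length : Int)

-- ===== PORT B =====
-- loop body of B: state is (prev, distinct); count when prev is None or x != prev
def bStep (st : Option Int × Int) (x : Int) : Option Int × Int :=
  (some x, if st.1 = none ∨ some x ≠ st.1 then st.2 + 1 else st.2)

def solution_alt (nums : List Int) : Int :=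
  let s := PySem.List.sorted nums (fun x => x) false
  let distinct := (s.foldl bStep ((none : Option Int), (0 : Int))).2
  min distinct (PySem.Int.floordiv (PySem.List.len nums) 2)

-- ===== PRECONDITION & SPEC =====
def Spec_solution (nums : List Int) (out : Int) : Prop := out = solution_alt nums
instance (nums : List Int) (out : Int) : Decidable (Spec_solution nums out) := by unfold Spec_solution; infer_instance

-- ===== CLAIM (what is proved, stated in full; the proofs are below) =====
def Claim_equal_solution : Prop := ∀ (nums : List Int), Dom_solution nums → Spec_solution nums (solution nums)

-- ===== LEMMAS AND PROOFS =====

-- A's loop keeps the first HALF distinct values, so its length is min(#distinct, HALF)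
theorem a_loop (H : Int) : ∀ (l sel : List Int), sel.Nodup → (sel.length : Int) ≤ H →
    ((l.foldl (fun s x => aStep H s x) sel).length : Int)
      = min ((sel.toFinset ∪ l.toFinset).card : Int) H := by
  intro l
  induction l with
  | nil =>
      intro sel hnd hle
      simp [List.toFinset_card_of_nodup hnd, min_eq_left hle]
  | cons x xs ih =>
      intro sel hnd hle
      by_cases hx : x ∈ sel
      · have : aStep H sel x = sel := by simp [aStep, hx]
        have hset : sel.toFinset ∪ insert x xs.toFinset = sel.toFinset ∪ xs.toFinset := by
          ext y
          simp only [Finset.mem_union, Finset.mem_insert, List.mem_toFinset]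
          constructor
          · rintro (h | rfl | h)
            · tauto
            · exact Or.inl hx
            · tauto
          · tauto
        simp only [List.foldl_cons, this, ih sel hnd hle, List.toFinset_cons, hset]
      · by_cases hlt : (sel.length : Int) < H
        · have hstep : aStep H sel x = sel ++ [x] := by simp [aStep, hx, hlt]
          have hnd' : (sel ++ [x]).Nodup := by
            rw [List.nodup_append]
            refine ⟨hnd, List.nodup_singleton x, ?_⟩
            intro a ha b hb heq
            rw [List.mem_singleton] at hb
            rw [heq, hb] at ha
            exact hx ha
          have hle' : ((sel ++ [x]).length : Int) ≤ H := by
            simp only [List.length_append, List.length_cons, List.length_nil]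
            push_cast; omega
          have hset : (sel ++ [x]).toFinset ∪ xs.toFinset
              = sel.toFinset ∪ insert x xs.toFinset := by
            ext y
            simp only [List.toFinset_append, List.toFinset_cons, List.toFinset_nil,
              Finset.mem_union, Finset.mem_insert, List.mem_toFinset,
              Finset.mem_insert]
            tauto
          simp only [List.foldl_cons, hstep, ih _ hnd' hle', List.toFinset_cons, hset]
        · -- the list is full: both sides are H
          have hstep : aStep H sel x = sel := by simp [aStep, hlt]
          have heq : (sel.length : Int) = H := le_antisymm hle (by omega)
          have hcard : ∀ t : Finset Int, sel.toFinset ⊆ t → min ((t.card : Int)) H = H := by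
            intro t hsub
            have : sel.toFinset.card ≤ t.card := Finset.card_le_card hsub
            rw [List.toFinset_card_of_nodup hnd] at this
            have : H ≤ (t.card : Int) := by omega
            omega
          simp only [List.foldl_cons, hstep, ih sel hnd hle, List.toFinset_cons]
          rw [hcard _ Finset.subset_union_left, hcard _ Finset.subset_union_left]

-- B's adjacent-comparison scan, after the first element, counts the values above prev
theorem b_scan : ∀ (s : List Int) (p c : Int), s.Pairwise (· ≤ ·) → (∀ y ∈ s, p ≤ y) →
    (s.foldl bStep (some p, c)).2 = c + ((s.toFinset.erase p).card : Int) := by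
  intro s
  induction s with
  | nil => intro p c _ _; simp
  | cons x xs ih =>
      intro p c hsort hge
      have hx := hge x (by simp)
      have hxs : xs.Pairwise (· ≤ ·) := hsort.of_cons
      have hxall : ∀ y ∈ xs, x ≤ y := fun y hy => (List.pairwise_cons.1 hsort).1 y hy
      by_cases hxp : x = p
      · subst hxp
        have : bStep (some x, c) x = (some x, c) := by simp [bStep]
        rw [List.foldl_cons, this, ih x c hxs hxall]
        congr 2
        rw [List.toFinset_cons, Finset.erase_insert_eq_erase]
      · have hlt : p < x := lt_of_le_of_ne hx (fun h => hxp h.symm)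
        have : bStep (some p, c) x = (some x, c + 1) := by simp [bStep, hxp]
        rw [List.foldl_cons, this, ih x (c + 1) hxs hxall]
        have hpnot : p ∉ (x :: xs).toFinset := by
          simp only [List.toFinset_cons, Finset.mem_insert, List.mem_toFinset]
          push Not
          exact ⟨fun h => absurd h.symm hxp, fun h => absurd rfl (ne_of_gt (lt_of_lt_of_le hlt (hxall p h)))⟩
        rw [Finset.erase_eq_of_notMem hpnot, List.toFinset_cons]
        by_cases hxin : x ∈ xs.toFinset
        · rw [Finset.insert_eq_of_mem hxin]
          have := Finset.card_erase_add_one hxin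
          omega
        · rw [Finset.card_insert_of_notMem hxin, Finset.erase_eq_of_notMem hxin]
          push_cast; omega

-- B computes min(#distinct values of nums, HALF)
theorem b_value (nums : List Int) :
    solution_alt nums = min ((nums.toFinset.card : Int)) (PySem.Int.floordiv (PySem.List.len nums) 2) := by
  unfold solution_alt
  have hperm : (PySem.List.sorted nums (fun x => x) false).Perm nums := PySem.List.sorted_perm ..
  have htf : (PySem.List.sorted nums (fun x => x) false).toFinset = nums.toFinset := by
    ext y
    simp only [List.mem_toFinset]
    exact hperm.mem_iff
  have hsort : (PySem.List.sorted nums (fun x => x) false).Pairwise (· ≤ ·) :=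
    PySem.List.sorted_pairwise ..
  cases hs : PySem.List.sorted nums (fun x => x) false with
  | nil =>
      rw [hs] at htf
      simp [← htf]
  | cons x xs =>
      rw [hs] at htf hsort
      have hxall : ∀ y ∈ xs, x ≤ y := fun y hy => (List.pairwise_cons.1 hsort).1 y hy
      have h1 : bStep ((none : Option Int), (0 : Int)) x = (some x, 1) := by simp [bStep]
      simp only [List.foldl_cons, h1]
      rw [b_scan xs x 1 hsort.of_cons hxall, ← htf, List.toFinset_cons]
      congr 2
      by_cases hxin : x ∈ xs.toFinset
      · rw [Finset.insert_eq_of_mem hxin]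
        have := Finset.card_erase_add_one hxin
        omega
      · rw [Finset.card_insert_of_notMem hxin, Finset.erase_eq_of_notMem hxin]
        push_cast; omega

-- ===== VERDICT (by name: the statement is the Claim_ definition above) =====
theorem solution_spec : Claim_equal_solution := by
  intro nums _
  unfold Spec_solution
  rw [b_value]
  have hcast : PySem.Int.floordiv ((nums.length : Int)) 2 = ((nums.length / 2 : Nat) : Int) := by
    exact_mod_cast PySem.Int.floordiv_natCast nums.length 2
  have hH : (0 : Int) ≤ PySem.Int.floordiv ((nums.length : Int)) 2 := by
    rw [hcast]; positivity
  simp only [solution, PySem.List.len_eq]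
  rw [PySem.List.foldl_pyRange_zero_pyGetD' nums 0
    (fun s x => aStep (PySem.Int.floordiv ((nums.length : Int)) 2) s x) []]
  rw [a_loop _ nums [] List.nodup_nil (by simpa using hH)]
  simp
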